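-- pv_equiv track=rewrite | github.com/kvnwng11/match-hub | backend/main.py | organize
-- ===== SOURCE A (Python) =====
-- def organize(fixtures):
--     """ Puts all games into a nicely formatted dict """
--     organized = {}
--
--     for game in fixtures:
--         date = game["date"]
--         if date not in organized:
--             organized[date] = []
--         organized[date].append(game)
--
--     return organized
-- ===== SOURCE B (Python) =====
-- def organize(fixtures):
--     """ Puts all games into a nicely formatted dict """
--     dates = dict.fromkeys(g["date"] for g in fixtures)
--     return {d: [g for g in fixtures if g["date"] == d] for d in dates}
-- ===== Notes on version B (the rewrite author's own statement) =====
-- stated objective: alternative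
-- what changed: B derives the distinct dates first (dict.fromkeys) and builds each group by a separate filtering pass over fixtures, instead of A's single pass maintaining an incrementally-grown dict with per-game membership tests and in-place appends.
import Mathlib
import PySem

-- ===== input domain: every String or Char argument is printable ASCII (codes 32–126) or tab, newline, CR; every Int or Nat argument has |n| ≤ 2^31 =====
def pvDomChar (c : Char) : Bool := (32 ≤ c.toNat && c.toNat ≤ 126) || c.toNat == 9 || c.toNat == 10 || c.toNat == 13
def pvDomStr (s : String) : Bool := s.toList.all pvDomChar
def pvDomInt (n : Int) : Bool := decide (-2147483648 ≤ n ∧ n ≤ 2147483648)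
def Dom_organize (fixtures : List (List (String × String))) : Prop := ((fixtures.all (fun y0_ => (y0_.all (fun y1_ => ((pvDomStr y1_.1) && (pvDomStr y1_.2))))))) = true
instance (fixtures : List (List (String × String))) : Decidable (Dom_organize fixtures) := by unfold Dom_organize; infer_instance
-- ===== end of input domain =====

-- B groups by first collecting the distinct dates, then one filtering pass per date;
-- same return value as A (which incrementally grows a dict), not faster — 'alternative'.

-- shared accessor: game["date"] (total form; Pre_ guarantees the key is present)
def pvDate (g : List (String × String)) : String :=
  ((PySem.Dict.mk g).get? "date").getD ""

-- ===== PORT A =====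
def organize (fixtures : List (List (String × String))) : List (String × List (List (String × String))) :=
  (fixtures.foldl
    (fun organized game =>
      let date := pvDate game
      let organized := if organized.contains date then organized else organized.insert date []
      organized.modify date [] (fun l => l ++ [game]))
    PySem.Dict.empty).items

-- ===== PORT B =====
def organize_alt (fixtures : List (List (String × String))) : List (String × List (List (String × String))) :=
  let dates := PySem.List.dedup (fixtures.map pvDate)
  dates.map (fun d => (d, fixtures.filter (fun g => pvDate g == d)))

-- ===== PRECONDITION & SPEC =====
-- Pre_ excludes exactly the games lacking a "date" key, on which A raises KeyError.
def Pre_organize (fixtures : List (List (String × String))) : Prop :=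
  (fixtures.all (fun g => (PySem.Dict.mk g).contains "date")) = true
instance (fixtures : List (List (String × String))) : Decidable (Pre_organize fixtures) := by unfold Pre_organize; infer_instance
def pvWitness_organize : (List (List (String × String))) := ([[("date", "2024-01-01"), ("home", "A")], [("date", "2024-01-02")], [("date", "2024-01-01")]])

def Spec_organize (fixtures : List (List (String × String))) (out : List (String × List (List (String × String)))) : Prop := out = organize_alt fixtures
instance (fixtures : List (List (String × String))) (out : List (String × List (List (String × String)))) : Decidable (Spec_organize fixtures out) := by unfold Spec_organize; infer_instance

-- ===== CLAIM (what is proved, stated in full; the proofs are below) =====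
def Claim_equal_organize : Prop := ∀ (fixtures : List (List (String × String))), Dom_organize fixtures → Pre_organize fixtures → Spec_organize fixtures (organize fixtures)

-- ===== LEMMAS AND PROOFS =====

-- A's "ensure key, then append" step equals a single modify-with-default-[] step.
theorem organize_step_eq (d : PySem.Dict String (List (List (String × String)))) (g : List (String × String)) :
    (if d.contains (pvDate g) then d else d.insert (pvDate g) []).modify (pvDate g) [] (fun l => l ++ [g])
      = d.modify (pvDate g) [] (fun l => l ++ [g]) := by
  by_cases h : d.contains (pvDate g) = true
  · rw [if_pos h]
  · rw [if_neg h]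
    simp only [PySem.Dict.modify, PySem.Dict.getD_insert_self, PySem.Dict.insert_insert_self,
      PySem.Dict.getD_of_not_contains d [] (by simpa using h)]

-- the per-key lookup of the grouping fold is the filtering pass B performs
theorem organize_getD_eq (fixtures : List (List (String × String))) (c : String) :
    (List.foldl (fun d g => d.modify (pvDate g) [] (fun l => l ++ [g])) PySem.Dict.empty fixtures).getD c []
      = fixtures.filter (fun g => pvDate g == c) := by
  have h1 : List.foldl (fun d g => d.modify (pvDate g) [] (fun l => l ++ [g]))
      (PySem.Dict.empty : PySem.Dict String (List (List (String × String)))) fixtures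
      = List.foldl (fun d (p : String × List (String × String)) => d.modify p.1 [] (fun l => l ++ [p.2]))
        PySem.Dict.empty (fixtures.map (fun g => (pvDate g, g))) := by
    rw [List.foldl_map]
  rw [h1, PySem.Dict.getD_foldl_modify_append]
  simp [List.filter_map, Function.comp_def]

-- ===== VERDICT =====
theorem organize_spec : Claim_equal_organize := by
  intro fixtures _ _
  unfold Spec_organize organize organize_alt
  have hstep : (fun (d : PySem.Dict String (List (List (String × String)))) game =>
      let date := pvDate game
      let d' := if d.contains date then d else d.insert date []
      d'.modify date [] (fun l => l ++ [game])) =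
      fun d g => d.modify (pvDate g) [] (fun l => l ++ [g]) := by
    funext d g; exact organize_step_eq d g
  rw [hstep]
  have hnd : (List.foldl (fun d g => d.modify (pvDate g) [] (fun l => l ++ [g]))
      PySem.Dict.empty fixtures).keys.Nodup :=
    PySem.Dict.nodup_keys_foldl_modify_key fixtures pvDate [] (fun _ g l => l ++ [g])
      PySem.Dict.empty (by simp [PySem.Dict.keys_empty])
  rw [PySem.Dict.items_eq_map_keys _ hnd []]
  rw [PySem.Dict.keys_foldl_modify_key fixtures pvDate [] (fun _ g l => l ++ [g])]
  simp only [PySem.Dict.keys_empty, PySem.Set.update_nil_left, PySem.List.dedup_eq_ofList]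
  exact List.map_congr_left (fun k _ => by rw [organize_getD_eq])
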